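-- pv_equiv track=rewrite | github.com/AshishSalaskar1/DS_Algo_Playground | Track/DSA_A_to_Z/Sweep_Lines/Meeting_room_k_occupancy.py | meeting_duration_k
-- ===== SOURCE A (Python) =====
-- def meeting_duration_k(intervals, k):
--     points = []
--     for entry, exit in intervals:
--         points.append((entry, 1)) # enter means num_ppl += 1
--         points.append((exit, -1)) # exit means num_ppl += 1
--
--     events = sorted(points)
--     nevents = len(events)
--     res = 0
--     cur_ppl = 0
--
--     for i in range(0, nevents):
--         cur_ppl += events[i][1]
--         if cur_ppl >= k and i+1<nevents: # if you have >= k people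
--             # now the cur_ppl will remain same untill next event (event[i+1])
--             res += events[i+1][0] - events[i][0]
--
--     return res
-- ===== SOURCE B (Python) =====
-- def meeting_duration_k(intervals, k):
--     # Brute force over elementary segments: for each gap between consecutive
--     # distinct timestamps, recount from scratch how many meetings are active.
--     times = sorted({t for iv in intervals for t in iv})
--     total = 0
--     for t, nxt in zip(times, times[1:]):
--         active = 0
--         for s, e in intervals:
--             if s <= t:
--                 active += 1
--             if e <= t:
--                 active -= 1
--         if active >= k:
--             total += nxt - t
--     return total
-- ===== Notes on version B (the rewrite author's own statement) =====
-- stated objective: alternative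
-- what changed: A sorts a 2n-long (time, +/-1) event list and sweeps it once with a running occupancy counter; B keeps no running state at all: it sorts only the distinct timestamps and, for each gap between consecutive distinct times, recounts from scratch (a direct scan of the intervals) how many meetings are active there.
import Mathlib
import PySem

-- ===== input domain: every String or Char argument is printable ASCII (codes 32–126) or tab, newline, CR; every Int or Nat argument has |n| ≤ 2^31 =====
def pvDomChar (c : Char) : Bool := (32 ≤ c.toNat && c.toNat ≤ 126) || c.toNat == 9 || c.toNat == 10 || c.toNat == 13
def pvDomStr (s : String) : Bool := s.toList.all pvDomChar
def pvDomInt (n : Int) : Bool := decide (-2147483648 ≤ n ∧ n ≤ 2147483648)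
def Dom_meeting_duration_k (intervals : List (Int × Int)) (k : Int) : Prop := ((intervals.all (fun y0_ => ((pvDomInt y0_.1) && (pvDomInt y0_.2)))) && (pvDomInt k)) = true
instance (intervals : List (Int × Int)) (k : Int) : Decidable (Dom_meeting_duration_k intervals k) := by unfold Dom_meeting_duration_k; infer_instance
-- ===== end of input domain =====

-- B replaces A's sorted ±1 event list with a running occupancy counter by a stateless
-- brute force: sort only the distinct timestamps and, for each gap between consecutive
-- distinct times, recount the active meetings from scratch by scanning the intervals
-- (objective: alternative; O(n^2) instead of A's O(n log n)).

-- ===== PORT A =====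
-- indexing note: events[i] and events[i+1] are only read under i < nevents (loop bound) resp.
-- i+1 < nevents (the tested condition), so Python never raises; pyGetD's default is never used.
def meeting_duration_k (intervals : List (Int × Int)) (k : Int) : Int :=
  let points := intervals.foldl (fun pts p => (pts ++ [(p.1, (1 : Int))]) ++ [(p.2, (-1 : Int))]) []
  let events := PySem.List.sorted2 points Prod.fst Prod.snd false
  let nevents : Int := events.length
  let r := (PySem.List.pyRange 0 nevents 1).foldl
    (fun (s : Int × Int) i =>
      let cur := s.2 + (PySem.List.pyGetD events i ((0:Int),(0:Int))).2
      let res := if k ≤ cur ∧ i + 1 < nevents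
        then s.1 + ((PySem.List.pyGetD events (i+1) ((0:Int),(0:Int))).1
                    - (PySem.List.pyGetD events i ((0:Int),(0:Int))).1)
        else s.1
      (res, cur)) ((0:Int), (0:Int))
  r.1

-- ===== PORT B =====
def meeting_duration_k_alt (intervals : List (Int × Int)) (k : Int) : Int :=
  let times := PySem.List.sorted (PySem.Set.ofList (intervals.flatMap fun iv => [iv.1, iv.2])) (fun t => t) false
  (times.zip (PySem.List.slice times (some 1) none)).foldl
    (fun (total : Int) tp =>
      let active := intervals.foldl
        (fun (a : Int) p =>
          let a' := if p.1 ≤ tp.1 then a + 1 else a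
          if p.2 ≤ tp.1 then a' - 1 else a') 0
      if k ≤ active then total + (tp.2 - tp.1) else total) 0

-- ===== PRECONDITION & SPEC =====
def Spec_meeting_duration_k (intervals : List (Int × Int)) (k : Int) (out : Int) : Prop := out = meeting_duration_k_alt intervals k
instance (intervals : List (Int × Int)) (k : Int) (out : Int) : Decidable (Spec_meeting_duration_k intervals k out) := by unfold Spec_meeting_duration_k; infer_instance

-- ===== CLAIM (what is proved, stated in full; the proofs are below) =====
def Claim_equal_meeting_duration_k : Prop := ∀ (intervals : List (Int × Int)) (k : Int), Dom_meeting_duration_k intervals k → Spec_meeting_duration_k intervals k (meeting_duration_k intervals k)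

-- ===== LEMMAS AND PROOFS =====
def pvAux (k : Int) : List (Int × Int) → Int → Int
  | [], _ => 0
  | [_], _ => 0
  | e1 :: e2 :: rest, cur =>
      (if k ≤ cur + e1.2 then e2.1 - e1.1 else 0) + pvAux k (e2 :: rest) (cur + e1.2)
def pvAgg : List (Int × Int) → List (Int × Int)
  | [] => []
  | e :: rest =>
    match pvAgg rest with
    | [] => [e]
    | e' :: tail => if e.1 = e'.1 then (e.1, e.2 + e'.2) :: tail else e :: e' :: tail

theorem pvAgg_cons (e : Int × Int) (l : List (Int × Int)) :
    ∃ s tl, pvAgg (e :: l) = (e.1, s) :: tl := by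
  rw [pvAgg.eq_2]
  rcases h : pvAgg l with _ | ⟨e', tail⟩
  · exact ⟨e.2, [], rfl⟩
  · by_cases he : e.1 = e'.1
    · exact ⟨e.2 + e'.2, tail, by simp [he]⟩
    · exact ⟨e.2, e' :: tail, by simp [he]⟩

theorem pvAux_shift (k t d s : Int) (tl : List (Int × Int)) (c : Int) :
    pvAux k ((t, d + s) :: tl) c = pvAux k ((t, s) :: tl) (c + d) := by
  cases tl with
  | nil => simp [pvAux]
  | cons e2 rest =>
    simp only [pvAux]
    have : c + (d + s) = c + d + s := by ring
    rw [this]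

theorem pvAux_agg (k : Int) (E : List (Int × Int)) (c : Int) :
    pvAux k E c = pvAux k (pvAgg E) c := by
  induction E generalizing c with
  | nil => rfl
  | cons e1 rest ih =>
    cases rest with
    | nil => simp [pvAgg, pvAux]
    | cons e2 r2 =>
      obtain ⟨s, tl, hagg⟩ := pvAgg_cons e2 r2
      rw [pvAgg.eq_2, hagg]
      have h1 : pvAux k (e1 :: e2 :: r2) c
          = (if k ≤ c + e1.2 then e2.1 - e1.1 else 0) + pvAux k (e2 :: r2) (c + e1.2) := rfl
      by_cases he : e1.1 = e2.1
      · simp only [he, if_true]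
        rw [pvAux_shift, ← hagg, ← ih, h1]
        have hz : e2.1 - e1.1 = 0 := by rw [he]; ring
        rw [hz]
        simp
      · simp only [if_neg he]
        have h2 : pvAux k (e1 :: (e2.1, s) :: tl) c
            = (if k ≤ c + e1.2 then e2.1 - e1.1 else 0) + pvAux k ((e2.1, s) :: tl) (c + e1.2) := rfl
        rw [h1, h2, ← hagg, ← ih]

def pvSum (E : List (Int × Int)) (t : Int) : Int :=
  ((E.filter (fun e => e.1 = t)).map Prod.snd).sum

theorem pvAgg_eq_nil_iff (E : List (Int × Int)) : pvAgg E = [] ↔ E = [] := by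
  constructor
  · intro h
    cases E with
    | nil => rfl
    | cons a l =>
      obtain ⟨s, tl, hc⟩ := pvAgg_cons a l
      rw [hc] at h; exact absurd h (by simp)
  · intro h; rw [h]; rfl

theorem pvAgg_head_min (rest : List (Int × Int)) (hrest : rest.Pairwise (fun a b => a.1 ≤ b.1))
    (e' : Int × Int) (tail : List (Int × Int)) (hagg : pvAgg rest = e' :: tail) :
    (∀ t ∈ rest.map Prod.fst, e'.1 ≤ t) ∧ e'.1 ∈ rest.map Prod.fst := by
  cases rest with
  | nil => exact absurd hagg (by simp [pvAgg])
  | cons r1 r2 =>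
    obtain ⟨s, tl, hc⟩ := pvAgg_cons r1 r2
    rw [hc] at hagg
    injection hagg with h1 h2
    have he'1 : e'.1 = r1.1 := by rw [← h1]
    rw [List.pairwise_cons] at hrest
    constructor
    · intro t ht
      rw [he'1]
      obtain ⟨b, hb, hb1⟩ := List.mem_map.mp ht
      rcases List.mem_cons.mp hb with hb | hb
      · rw [← hb1, hb]
      · rw [← hb1]; exact hrest.1 b hb
    · rw [he'1]; simp

theorem pvAgg_mem_fst (E : List (Int × Int)) (t : Int) :
    t ∈ (pvAgg E).map Prod.fst ↔ t ∈ E.map Prod.fst := by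
  induction E with
  | nil => rfl
  | cons e rest ih =>
    rcases h : pvAgg rest with _ | ⟨e', tail⟩
    · rw [(pvAgg_eq_nil_iff rest).mp h]
      rw [(pvAgg_eq_nil_iff rest).mp h] at h
      simp [pvAgg]
    · rw [pvAgg.eq_2, h]
      rw [h] at ih
      by_cases he : e.1 = e'.1
      · simp only [if_pos he]
        simp only [List.map_cons, List.mem_cons] at ih ⊢
        rw [he]
        tauto
      · simp only [if_neg he]
        simp only [List.map_cons, List.mem_cons] at ih ⊢
        tauto

theorem pvAgg_pairwise (E : List (Int × Int)) (h : E.Pairwise (fun a b => a.1 ≤ b.1)) :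
    (pvAgg E).Pairwise (fun a b => a.1 < b.1) := by
  induction E with
  | nil => exact List.Pairwise.nil
  | cons e rest ih =>
    rw [List.pairwise_cons] at h
    obtain ⟨hle, hrest⟩ := h
    have ihp := ih hrest
    rcases hagg : pvAgg rest with _ | ⟨e', tail⟩
    · rw [pvAgg.eq_2, hagg]; simp
    · rw [pvAgg.eq_2, hagg]
      rw [hagg] at ihp
      rw [List.pairwise_cons] at ihp
      obtain ⟨he'tail, htail⟩ := ihp
      obtain ⟨hmin, he'mem⟩ := pvAgg_head_min rest hrest e' tail hagg
      have he'le : e.1 ≤ e'.1 := by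
        obtain ⟨b, hb, hb1⟩ := List.mem_map.mp he'mem
        rw [← hb1]; exact hle b hb
      by_cases he : e.1 = e'.1
      · simp only [if_pos he]
        rw [List.pairwise_cons]
        refine ⟨fun b hb => ?_, htail⟩
        have := he'tail b hb
        omega
      · simp only [if_neg he]
        have hlt : e.1 < e'.1 := lt_of_le_of_ne he'le he
        rw [List.pairwise_cons]
        refine ⟨?_, by rw [List.pairwise_cons]; exact ⟨he'tail, htail⟩⟩
        intro b hb
        rcases List.mem_cons.mp hb with hb | hb
        · rw [hb]; exact hlt
        · exact lt_trans hlt (he'tail b hb)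

theorem pvSum_cons (e : Int × Int) (E : List (Int × Int)) (t : Int) :
    pvSum (e :: E) t = (if e.1 = t then e.2 else 0) + pvSum E t := by
  by_cases h : e.1 = t
  · simp [pvSum, h]
  · simp [pvSum, h]

theorem pvSum_eq_zero (E : List (Int × Int)) (t : Int) (h : t ∉ E.map Prod.fst) :
    pvSum E t = 0 := by
  have : E.filter (fun e => e.1 = t) = [] := by
    rw [List.filter_eq_nil_iff]
    intro e he hd
    exact h (List.mem_map.mpr ⟨e, he, by simpa using hd⟩)
  simp [pvSum, this]

theorem pvAgg_snd (E : List (Int × Int)) (h : E.Pairwise (fun a b => a.1 ≤ b.1)) :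
    ∀ p ∈ pvAgg E, p.2 = pvSum E p.1 := by
  induction E with
  | nil => intro p hp; simp [pvAgg] at hp
  | cons e rest ih =>
    rw [List.pairwise_cons] at h
    obtain ⟨hle, hrest⟩ := h
    have ihs := ih hrest
    intro p hp
    rcases hagg : pvAgg rest with _ | ⟨e', tail⟩
    · rw [pvAgg.eq_2, hagg] at hp
      simp at hp
      subst hp
      rw [(pvAgg_eq_nil_iff rest).mp hagg]
      rw [pvSum_cons, if_pos rfl]
      simp [pvSum]
    · rw [pvAgg.eq_2, hagg] at hp
      have hp' : p ∈ (if e.1 = e'.1 then (e.1, e.2 + e'.2) :: tail else e :: e' :: tail) := hp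
      clear hp
      obtain ⟨hmin, he'mem⟩ := pvAgg_head_min rest hrest e' tail hagg
      have he'le : e.1 ≤ e'.1 := by
        obtain ⟨b, hb, hb1⟩ := List.mem_map.mp he'mem
        rw [← hb1]; exact hle b hb
      have hpairagg := pvAgg_pairwise rest hrest
      rw [hagg, List.pairwise_cons] at hpairagg
      by_cases he : e.1 = e'.1
      · rw [if_pos he] at hp'
        rcases List.mem_cons.mp hp' with hp | hp
        · subst hp
          have hs : e'.2 = pvSum rest e'.1 := ihs e' (by rw [hagg]; simp)
          rw [pvSum_cons, hs, he]
          simp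
        · have hgt : e'.1 < p.1 := hpairagg.1 p hp
          have hps : p.2 = pvSum rest p.1 := ihs p (by rw [hagg]; exact List.mem_cons_of_mem _ hp)
          rw [pvSum_cons, if_neg (by omega), hps]
          ring
      · rw [if_neg he] at hp'
        have hlt : e.1 < e'.1 := lt_of_le_of_ne he'le he
        rcases List.mem_cons.mp hp' with hp | hp
        · subst hp
          rw [pvSum_cons, if_pos rfl, pvSum_eq_zero rest p.1 (fun hm => by have := hmin p.1 hm; omega)]
          ring
        · have hpmem : p ∈ pvAgg rest := by rw [hagg]; exact hp
          have hp1mem : p.1 ∈ rest.map Prod.fst := (pvAgg_mem_fst rest p.1).mp (List.mem_map.mpr ⟨p, hpmem, rfl⟩)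
          have : e'.1 ≤ p.1 := hmin p.1 hp1mem
          rw [pvSum_cons, if_neg (by omega), ihs p hpmem]
          ring

theorem pv_sorted_ext (l1 l2 : List Int) (h1 : l1.Pairwise (· < ·)) (h2 : l2.Pairwise (· < ·))
    (hm : ∀ x, x ∈ l1 ↔ x ∈ l2) : l1 = l2 := by
  have nd1 : l1.Nodup := h1.nodup
  have nd2 : l2.Nodup := h2.nodup
  have hp : l1.Perm l2 := (List.perm_ext_iff_of_nodup nd1 nd2).mpr hm
  exact List.Perm.eq_of_pairwise (le := (· ≤ ·)) (fun a b _ _ hab hba => le_antisymm hab hba)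
    (h1.imp le_of_lt) (h2.imp le_of_lt) hp

theorem pvLoopA (E : List (Int × Int)) (k : Int) :
    ∀ (m j : Nat) (res cur : Int), (j : Int) + (m : Int) = (E.length : Int) →
    ((PySem.List.pyRange (j : Int) ((E.length : Int)) 1).foldl
      (fun (s : Int × Int) i =>
        (if k ≤ s.2 + (PySem.List.pyGetD E i ((0:Int),(0:Int))).2 ∧ i + 1 < ((E.length : Int))
          then s.1 + ((PySem.List.pyGetD E (i+1) ((0:Int),(0:Int))).1
                      - (PySem.List.pyGetD E i ((0:Int),(0:Int))).1)
          else s.1,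
         s.2 + (PySem.List.pyGetD E i ((0:Int),(0:Int))).2)) (res, cur)).1
    = res + pvAux k (E.drop j) cur := by
  intro m
  induction m with
  | zero =>
    intro j res cur hj
    have hj' : j = E.length := by omega
    rw [PySem.List.pyRange_one_eq_nil (by omega)]
    subst hj'
    simp [pvAux]
  | succ m ihm =>
    intro j res cur hj
    have hjlt : j < E.length := by omega
    rw [PySem.List.pyRange_one_cons (by omega), List.foldl_cons]
    have hget : PySem.List.pyGetD E (j : Int) ((0:Int),(0:Int)) = E[j] := by
      rw [PySem.List.pyGetD_natCast]
      exact List.getD_eq_getElem _ _ hjlt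
    have hcast : ((j : Int) + 1) = ((j + 1 : Nat) : Int) := by push_cast; ring
    have hdropj : E.drop j = E[j] :: E.drop (j + 1) := List.drop_eq_getElem_cons hjlt
    by_cases hnext : j + 1 < E.length
    · have hget1 : PySem.List.pyGetD E ((j : Int) + 1) ((0:Int),(0:Int)) = E[j+1] := by
        rw [hcast, PySem.List.pyGetD_natCast]
        exact List.getD_eq_getElem _ _ hnext
      have hdropj1 : E.drop (j + 1) = E[j+1] :: E.drop (j + 2) := List.drop_eq_getElem_cons hnext
      rw [hget, hget1]
      have hcond : ((j : Int) + 1 < (E.length : Int)) := by push_cast; omega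
      rw [hcast, ihm (j+1) _ _ (by push_cast; omega), ← hcast]
      rw [hdropj, hdropj1, pvAux]
      rw [← hdropj1]
      simp only [hcond, and_true]
      by_cases hc : k ≤ cur + E[j].2
      · rw [if_pos hc, if_pos hc]; ring
      · rw [if_neg hc, if_neg hc]; ring
    · have hj1 : j + 1 = E.length := by omega
      have hcond : ¬ ((j : Int) + 1 < (E.length : Int)) := by push_cast; omega
      rw [hget]
      rw [if_neg (fun h => hcond h.2)]
      rw [hcast, ihm (j+1) _ _ (by push_cast; omega)]
      rw [hdropj]
      have : E.drop (j+1) = [] := by rw [hj1]; simp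
      rw [this]
      simp [pvAux]

-- === B side: per-segment recount ===
def pvSeg (k : Int) (C : Int → Int) : List Int → Int
  | [] => 0
  | [_] => 0
  | t1 :: t2 :: r => (if k ≤ C t1 then t2 - t1 else 0) + pvSeg k C (t2 :: r)

def pvC (L : List (Int × Int)) (t : Int) : Int :=
  (L.map fun p => (if p.1 ≤ t then (1:Int) else 0) - (if p.2 ≤ t then (1:Int) else 0)).sum

theorem pvInner (L : List (Int × Int)) (t : Int) : ∀ a : Int,
    L.foldl (fun (a : Int) p =>
      let a' := if p.1 ≤ t then a + 1 else a
      if p.2 ≤ t then a' - 1 else a') a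
    = a + pvC L t := by
  induction L with
  | nil => intro a; simp [pvC]
  | cons p rest ih =>
    intro a
    rw [List.foldl_cons, ih]
    simp only [pvC, List.map_cons, List.sum_cons]
    split_ifs <;> ring

theorem pvLoopB (k : Int) (C : Int → Int) :
    ∀ (ts : List Int) (tot : Int),
    ((ts.zip ts.tail).foldl
      (fun (tot : Int) tp => if k ≤ C tp.1 then tot + (tp.2 - tp.1) else tot) tot)
    = tot + pvSeg k C ts := by
  intro ts
  induction ts with
  | nil => intro tot; simp [pvSeg]
  | cons t1 rest ih =>
    intro tot
    cases rest with
    | nil => simp [pvSeg]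
    | cons t2 r2 =>
      simp only [List.tail_cons, List.zip_cons_cons, List.foldl_cons]
      simp only [List.tail_cons] at ih
      rw [ih]
      simp only [pvSeg]
      by_cases hc : k ≤ C t1
      · rw [if_pos hc, if_pos hc]; ring
      · rw [if_neg hc, if_neg hc]; ring

theorem pvAux_seg (k : Int) (C g : Int → Int) :
    ∀ (ts : List Int) (c : Int),
    (∀ pre t suf, ts = pre ++ t :: suf → C t = c + ((pre ++ [t]).map g).sum) →
    pvAux k (ts.map fun t => (t, g t)) c = pvSeg k C ts := by
  intro ts
  induction ts with
  | nil => intro c _; rfl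
  | cons t rest ih =>
    intro c H
    have hCt : C t = c + g t := by
      have := H [] t rest rfl
      simpa using this
    have H' : ∀ pre t' suf, rest = pre ++ t' :: suf →
        C t' = (c + g t) + ((pre ++ [t']).map g).sum := by
      intro pre t' suf h
      have := H (t :: pre) t' suf (by rw [h]; rfl)
      rw [this]
      simp
      ring
    cases rest with
    | nil => simp [pvSeg, pvAux]
    | cons t2 r2 =>
      have hA : pvAux k ((t :: t2 :: r2).map fun u => (u, g u)) c
          = (if k ≤ c + g t then t2 - t else 0)
            + pvAux k ((t2 :: r2).map fun u => (u, g u)) (c + g t) := rfl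
      rw [hA, ih (c + g t) H']
      simp only [pvSeg, hCt]

def pvCnt (x : Int) (m : List Int) : Int := (m.map fun u => if x = u then (1:Int) else 0).sum

theorem pvCnt_not_mem (x : Int) (m : List Int) (h : x ∉ m) : pvCnt x m = 0 := by
  induction m with
  | nil => rfl
  | cons u m ih =>
    simp only [List.mem_cons, not_or] at h
    simp only [pvCnt, List.map_cons, List.sum_cons, if_neg h.1]
    have := ih h.2
    simp only [pvCnt] at this
    omega

theorem pvCnt_nodup_mem (x : Int) (m : List Int) (hnd : m.Nodup) (h : x ∈ m) : pvCnt x m = 1 := by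
  induction m with
  | nil => simp at h
  | cons u m ih =>
    rw [List.nodup_cons] at hnd
    rcases List.mem_cons.mp h with h | h
    · subst h
      have h0 := pvCnt_not_mem x m hnd.1
      simp only [pvCnt, List.map_cons, List.sum_cons]
      simp only [pvCnt] at h0
      simp [h0]
    · have hne : x ≠ u := fun he => hnd.1 (he ▸ h)
      have := ih hnd.2 h
      simp only [pvCnt, List.map_cons, List.sum_cons, if_neg hne] at *
      omega

def pvTimes (intervals : List (Int × Int)) : List Int := intervals.flatMap (fun p => [p.1, p.2])
def pvPoints (intervals : List (Int × Int)) : List (Int × Int) :=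
  intervals.flatMap (fun p => [(p.1, (1:Int)), (p.2, (-1:Int))])

theorem pvMapFstPoints (intervals : List (Int × Int)) :
    (pvPoints intervals).map Prod.fst = pvTimes intervals := by
  simp [pvPoints, pvTimes, List.map_flatMap]

def pvNet (L : List (Int × Int)) (t : Int) : Int :=
  (L.map (fun p => (if p.1 = t then (1:Int) else 0) + (if p.2 = t then (-1:Int) else 0))).sum

theorem pvSum_points (intervals : List (Int × Int)) (t : Int) :
    pvSum (pvPoints intervals) t = pvNet intervals t := by
  induction intervals with
  | nil => simp [pvPoints, pvSum, pvNet]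
  | cons p rest ih =>
    have : pvPoints (p :: rest) = (p.1, (1:Int)) :: (p.2, (-1:Int)) :: pvPoints rest := by
      simp [pvPoints]
    rw [this, pvSum_cons, pvSum_cons, ih]
    simp only [pvNet, List.map_cons, List.sum_cons]
    ring

-- swap the double sum: summing pvNet over a list of timestamps = per-interval counts
theorem pvSwap (m : List Int) (L : List (Int × Int)) :
    (m.map (pvNet L)).sum = (L.map fun p => pvCnt p.1 m - pvCnt p.2 m).sum := by
  induction m with
  | nil =>
    simp only [List.map_nil, List.sum_nil]
    have : (L.map fun p => pvCnt p.1 [] - pvCnt p.2 []).sum = (L.map fun _ => (0:Int)).sum := by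
      congr 1
    rw [this]
    simp
  | cons u m ih =>
    simp only [List.map_cons, List.sum_cons, ih]
    have hnet : pvNet L u
        = (L.map fun p => (if p.1 = u then (1:Int) else 0) + (if p.2 = u then (-1:Int) else 0)).sum := rfl
    rw [hnet, ← List.sum_map_add]
    congr 1
    apply List.map_congr_left
    intro p _
    simp only [pvCnt, List.map_cons, List.sum_cons]
    by_cases h1 : p.1 = u <;> by_cases h2 : p.2 = u <;> simp [h1, h2] <;> ring

-- === sorted2 is nondecreasing on the first component ===
def pvBef (a b : Int × Int) : Bool :=
  decide (a.1 < b.1) || (!decide (b.1 < a.1) && decide (a.2 < b.2))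

theorem pvSorted2_eq (xs : List (Int × Int)) :
    PySem.List.sorted2 xs Prod.fst Prod.snd false
      = xs.foldl (fun acc x => PySem.List.insertBy pvBef x acc) [] := rfl

theorem pvBef_true {a b : Int × Int} (h : pvBef a b = true) : a.1 ≤ b.1 := by
  unfold pvBef at h
  simp at h
  rcases h with h | h
  · omega
  · omega

theorem pvBef_false {a b : Int × Int} (h : pvBef a b = false) : b.1 ≤ a.1 := by
  unfold pvBef at h
  simp at h
  omega

theorem pvInsertBy_pairwise (x : Int × Int) (ys : List (Int × Int))
    (h : ys.Pairwise (fun a b => a.1 ≤ b.1)) :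
    (PySem.List.insertBy pvBef x ys).Pairwise (fun a b => a.1 ≤ b.1) := by
  induction ys with
  | nil => simp [PySem.List.insertBy]
  | cons y ys ih =>
    rw [List.pairwise_cons] at h
    obtain ⟨hy, hys⟩ := h
    rw [PySem.List.insertBy]
    by_cases hb : pvBef x y = true
    · rw [if_pos hb]
      have hxy : x.1 ≤ y.1 := pvBef_true hb
      rw [List.pairwise_cons]
      refine ⟨?_, by rw [List.pairwise_cons]; exact ⟨hy, hys⟩⟩
      intro b hbmem
      rcases List.mem_cons.mp hbmem with hb' | hb'
      · rw [hb']; exact hxy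
      · exact le_trans hxy (hy b hb')
    · rw [if_neg hb]
      have hyx : y.1 ≤ x.1 := pvBef_false (by simpa using hb)
      rw [List.pairwise_cons]
      refine ⟨?_, ih hys⟩
      intro b hbmem
      rcases (PySem.List.mem_insertBy pvBef x b ys).mp hbmem with hb' | hb'
      · rw [hb']; exact hyx
      · exact hy b hb'

theorem pvSorted2_pairwise (xs : List (Int × Int)) :
    (PySem.List.sorted2 xs Prod.fst Prod.snd false).Pairwise (fun a b => a.1 ≤ b.1) := by
  rw [pvSorted2_eq]
  have : ∀ (acc : List (Int × Int)), acc.Pairwise (fun a b => a.1 ≤ b.1) →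
      (xs.foldl (fun acc x => PySem.List.insertBy pvBef x acc) acc).Pairwise (fun a b => a.1 ≤ b.1) := by
    induction xs with
    | nil => intro acc h; simpa using h
    | cons x xs ih =>
      intro acc h
      rw [List.foldl_cons]
      exact ih _ (pvInsertBy_pairwise x acc h)
  exact this [] List.Pairwise.nil

theorem pv_main (intervals : List (Int × Int)) (k : Int) :
    meeting_duration_k intervals k = meeting_duration_k_alt intervals k := by
  -- A side: A = pvAux over the sorted event list
  have hpoints : intervals.foldl (fun pts p => (pts ++ [(p.1, (1:Int))]) ++ [(p.2, (-1:Int))]) []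
      = pvPoints intervals := by
    have hfn : (fun (pts : List (Int × Int)) (p : Int × Int) => (pts ++ [(p.1, (1:Int))]) ++ [(p.2, (-1:Int))])
        = (fun pts p => pts ++ [(p.1, (1:Int)), (p.2, (-1:Int))]) := by
      funext pts p; simp
    rw [hfn, PySem.List.foldl_append_eq_flatMap]
    simp [pvPoints]
  set E := PySem.List.sorted2 (pvPoints intervals) Prod.fst Prod.snd false with hE
  have hEperm : E.Perm (pvPoints intervals) := PySem.List.sorted2_perm _ _ _ _
  have hEpair : E.Pairwise (fun a b => a.1 ≤ b.1) := pvSorted2_pairwise _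
  have hA : meeting_duration_k intervals k = pvAux k E 0 := by
    simp only [meeting_duration_k]
    rw [hpoints, ← hE]
    have h0 := pvLoopA E k E.length 0 0 0 (by simp)
    simp only [Nat.cast_zero, List.drop_zero, zero_add] at h0
    exact h0
  -- B side: B = pvSeg with the recounted coverage
  set ts := PySem.List.sorted (PySem.Set.ofList (intervals.flatMap fun iv => [iv.1, iv.2])) (fun t => t) false with hts
  have hB : meeting_duration_k_alt intervals k = pvSeg k (pvC intervals) ts := by
    simp only [meeting_duration_k_alt, ← hts]
    rw [PySem.List.slice_from_one]
    have hfun : (fun (total : Int) (tp : Int × Int) =>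
        let active := intervals.foldl
          (fun (a : Int) p =>
            let a' := if p.1 ≤ tp.1 then a + 1 else a
            if p.2 ≤ tp.1 then a' - 1 else a') 0
        if k ≤ active then total + (tp.2 - tp.1) else total)
        = (fun (tot : Int) tp => if k ≤ pvC intervals tp.1 then tot + (tp.2 - tp.1) else tot) := by
      funext tot tp
      simp only [pvInner, zero_add]
    rw [hfun, pvLoopB, zero_add]
  -- ts facts
  have htspair : ts.Pairwise (· < ·) := by
    rw [hts]
    exact PySem.List.sorted_ofList_pairwise_lt _
  have htsmem : ∀ t, t ∈ ts ↔ t ∈ pvTimes intervals := by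
    intro t
    rw [hts, PySem.List.mem_sorted, PySem.Set.mem_ofList]
    exact Iff.rfl
  -- the aggregated event list is ts decorated with net deltas
  have hfst : (pvAgg E).map Prod.fst = ts := by
    apply pv_sorted_ext
    · exact List.pairwise_map.mpr (pvAgg_pairwise E hEpair)
    · exact htspair
    · intro t
      rw [pvAgg_mem_fst, htsmem, ← pvMapFstPoints]
      exact (hEperm.map Prod.fst).mem_iff
  have hsnd : ∀ p ∈ pvAgg E, p.2 = pvNet intervals p.1 := by
    intro p hp
    rw [← pvSum_points]
    have h1 := pvAgg_snd E hEpair p hp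
    rw [h1]
    unfold pvSum
    exact List.Perm.sum_eq ((hEperm.filter _).map Prod.snd)
  have hagg : pvAgg E = ts.map (fun t => (t, pvNet intervals t)) :=
    calc pvAgg E = (pvAgg E).map (fun p => (p.1, pvNet intervals p.1)) := by
          conv_lhs => rw [← List.map_id (pvAgg E)]
          apply List.map_congr_left
          intro p hp
          rw [← hsnd p hp]
          rfl
      _ = ((pvAgg E).map Prod.fst).map (fun t => (t, pvNet intervals t)) := by
          rw [List.map_map]; rfl
      _ = ts.map (fun t => (t, pvNet intervals t)) := by rw [hfst]
  -- the prefix-sum hypothesis: coverage at t = sum of net deltas over timestamps ≤ t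
  have H : ∀ pre t suf, ts = pre ++ t :: suf →
      pvC intervals t = 0 + ((pre ++ [t]).map (pvNet intervals)).sum := by
    intro pre t suf hsplit
    rw [zero_add]
    have hpair : (pre ++ t :: suf).Pairwise (· < ·) := hsplit ▸ htspair
    rw [List.pairwise_append] at hpair
    obtain ⟨hpre, hcons, hcross⟩ := hpair
    rw [List.pairwise_cons] at hcons
    have hm_le : ∀ u ∈ pre ++ [t], u ≤ t := by
      intro u hu
      rcases List.mem_append.mp hu with hu | hu
      · exact le_of_lt (hcross u hu t (List.mem_cons_self))
      · simp at hu; omega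
    have hm_nd : (pre ++ [t]).Nodup := by
      have : (pre ++ [t]).Pairwise (· < ·) := by
        rw [List.pairwise_append]
        refine ⟨hpre, List.pairwise_singleton _ _, ?_⟩
        intro a ha b hb
        simp at hb
        rw [hb]
        exact hcross a ha t List.mem_cons_self
      exact this.nodup
    have hcnt : ∀ x, x ∈ pvTimes intervals →
        pvCnt x (pre ++ [t]) = if x ≤ t then (1:Int) else 0 := by
      intro x hx
      have hxts : x ∈ pre ++ t :: suf := hsplit ▸ (htsmem x).mpr hx
      by_cases hle : x ≤ t
      · rw [if_pos hle]
        apply pvCnt_nodup_mem x _ hm_nd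
        rcases List.mem_append.mp hxts with hx' | hx'
        · exact List.mem_append.mpr (Or.inl hx')
        · rcases List.mem_cons.mp hx' with hx' | hx'
          · subst hx'; simp
          · exact absurd hle (by have := hcons.1 x hx'; omega)
      · rw [if_neg hle]
        apply pvCnt_not_mem
        intro hmem
        exact hle (hm_le x hmem)
    rw [pvSwap]
    unfold pvC
    congr 1
    apply List.map_congr_left
    intro p hp
    have h1 : p.1 ∈ pvTimes intervals := by
      simp only [pvTimes, List.mem_flatMap]
      exact ⟨p, hp, by simp⟩
    have h2 : p.2 ∈ pvTimes intervals := by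
      simp only [pvTimes, List.mem_flatMap]
      exact ⟨p, hp, by simp⟩
    rw [hcnt p.1 h1, hcnt p.2 h2]
  rw [hA, hB, pvAux_agg, hagg]
  exact pvAux_seg k (pvC intervals) (pvNet intervals) ts 0 H

-- ===== VERDICT (by name: the statement is the Claim_ definition above) =====
theorem meeting_duration_k_spec : Claim_equal_meeting_duration_k := by
  intro intervals k _hdom
  unfold Spec_meeting_duration_k
  exact pv_main intervals k
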